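-- pv_equiv track=rewrite | github.com/badguy2003st/putty-migration-tools | tui/core/tabby_export.py | _infer_group
-- ===== SOURCE A (Python) =====
-- def _infer_group(session_name: str, hostname: str) -> str:
--     """
--     Infer a group name from session name or hostname.
--
--     Args:
--         session_name: Session name
--         hostname: Hostname
--
--     Returns:
--         Group name
--     """
--     # Common patterns to extract group names
--     name_lower = session_name.lower()
--
--     if any(x in name_lower for x in ['prod', 'production']):
--         return "Production"
--     elif any(x in name_lower for x in ['dev', 'development']):
--         return "Development"
--     elif any(x in name_lower for x in ['staging', 'stage', 'test']):
--         return "Staging"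
--     elif any(x in name_lower for x in ['db', 'database', 'mysql', 'postgres']):
--         return "Databases"
--     elif any(x in name_lower for x in ['web', 'http', 'nginx', 'apache']):
--         return "Web Servers"
--     elif any(x in name_lower for x in ['vpn', 'gateway', 'router']):
--         return "Network"
--
--     # Default group
--     return "Imported from PuTTY"
-- ===== SOURCE B (Python) =====
-- # Text-driven scan: instead of testing each keyword against the name, walk the
-- # name once and look each substring (of a known keyword length) up in a
-- # keyword->priority dict, keeping the minimum priority seen.
-- _KEYWORDS = {
--     'prod': 0, 'production': 0,
--     'dev': 1, 'development': 1,
--     'staging': 2, 'stage': 2, 'test': 2,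
--     'db': 3, 'database': 3, 'mysql': 3, 'postgres': 3,
--     'web': 4, 'http': 4, 'nginx': 4, 'apache': 4,
--     'vpn': 5, 'gateway': 5, 'router': 5,
-- }
-- _LABELS = ["Production", "Development", "Staging", "Databases",
--            "Web Servers", "Network", "Imported from PuTTY"]
-- _LENGTHS = (2, 3, 4, 5, 6, 7, 8, 10, 11)  # the distinct keyword lengths
--
-- def _infer_group(session_name: str, hostname: str) -> str:
--     name = session_name.lower()
--     best = 6
--     for i in range(len(name)):
--         for l in _LENGTHS:
--             g = _KEYWORDS.get(name[i:i + l])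
--             if g is not None and g < best:
--                 best = g
--     return _LABELS[best]
-- ===== Notes on version B (the rewrite author's own statement) =====
-- stated objective: alternative
-- what changed: A tests each keyword against the name with substring searches in a fixed priority chain; B instead scans the lowered name once, looking each substring of a known keyword length up in a keyword->priority dict and keeping the minimum priority seen, then indexes a label table.
import Mathlib
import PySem

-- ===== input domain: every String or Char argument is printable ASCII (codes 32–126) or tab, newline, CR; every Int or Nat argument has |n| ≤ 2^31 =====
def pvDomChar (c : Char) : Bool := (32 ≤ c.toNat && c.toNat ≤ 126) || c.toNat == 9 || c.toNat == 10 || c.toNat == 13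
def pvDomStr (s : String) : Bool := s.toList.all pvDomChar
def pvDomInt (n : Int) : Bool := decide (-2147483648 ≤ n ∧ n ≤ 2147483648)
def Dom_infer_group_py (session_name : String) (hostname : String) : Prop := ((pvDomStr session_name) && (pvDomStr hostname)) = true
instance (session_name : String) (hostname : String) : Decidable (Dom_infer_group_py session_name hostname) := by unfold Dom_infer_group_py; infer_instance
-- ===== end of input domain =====

-- B replaces A's keyword-driven substring tests by a single text-driven scan: it walks the
-- lowered name once and looks each substring of a known keyword length up in a
-- keyword -> priority dict, keeping the minimum priority seen (objective: alternative).

-- ===== PORT A =====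
-- literal transliteration of A's if/elif chain; hostname unused, as in A
def infer_group_py (session_name : String) (hostname : String) : String :=
  let name_lower := PySem.Str.lower session_name
  if ["prod", "production"].any (fun x => PySem.Str.isIn x name_lower) then "Production"
  else if ["dev", "development"].any (fun x => PySem.Str.isIn x name_lower) then "Development"
  else if ["staging", "stage", "test"].any (fun x => PySem.Str.isIn x name_lower) then "Staging"
  else if ["db", "database", "mysql", "postgres"].any (fun x => PySem.Str.isIn x name_lower) then "Databases"
  else if ["web", "http", "nginx", "apache"].any (fun x => PySem.Str.isIn x name_lower) then "Web Servers"
  else if ["vpn", "gateway", "router"].any (fun x => PySem.Str.isIn x name_lower) then "Network"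
  else "Imported from PuTTY"

-- ===== PORT B =====
-- the _KEYWORDS dict: keyword -> group priority
def pvKWL : List (String × Nat) :=
  [("prod", 0), ("production", 0),
   ("dev", 1), ("development", 1),
   ("staging", 2), ("stage", 2), ("test", 2),
   ("db", 3), ("database", 3), ("mysql", 3), ("postgres", 3),
   ("web", 4), ("http", 4), ("nginx", 4), ("apache", 4),
   ("vpn", 5), ("gateway", 5), ("router", 5)]

def pvKeywords : PySem.Dict String Nat := PySem.Dict.ofList pvKWL

def pvLabels : List String :=
  ["Production", "Development", "Staging", "Databases",
   "Web Servers", "Network", "Imported from PuTTY"]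

-- the distinct keyword lengths
def pvLengths : List Int := [2, 3, 4, 5, 6, 7, 8, 10, 11]

def infer_group_py_alt (session_name : String) (hostname : String) : String :=
  let name := PySem.Str.lower session_name
  let best : Nat :=
    (PySem.List.pyRange 0 (PySem.Str.len name) 1).foldl
      (fun best i =>
        pvLengths.foldl
          (fun best l =>
            match PySem.Dict.get? pvKeywords (PySem.Str.slice name (some i) (some (i + l))) with
            | some g => if g < best then g else best
            | none => best)
          best)
      6
  PySem.List.pyGetD pvLabels (best : Int) ""

-- ===== PRECONDITION & SPEC =====
def Spec_infer_group_py (session_name : String) (hostname : String) (out : String) : Prop := out = infer_group_py_alt session_name hostname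
instance (session_name : String) (hostname : String) (out : String) : Decidable (Spec_infer_group_py session_name hostname out) := by unfold Spec_infer_group_py; infer_instance

-- ===== CLAIM (what is proved, stated in full; the proofs are below) =====
def Claim_equal_infer_group_py : Prop := ∀ (session_name : String) (hostname : String), Dom_infer_group_py session_name hostname → Spec_infer_group_py session_name hostname (infer_group_py session_name hostname)

-- ===== LEMMAS AND PROOFS =====

-- group g has an occurring keyword in the lowered name
def pvOcc (u : List Char) (g : Nat) : Prop := ∃ k : String, (k, g) ∈ pvKWL ∧ k.toList <:+: u

-- the scan's candidate pairs (position, length) and its per-pair lookup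
def pvPairs (name : String) : List (Int × Int) :=
  (PySem.List.pyRange 0 (PySem.Str.len name) 1).flatMap (fun i => pvLengths.map (Prod.mk i))

def pvV (name : String) (p : Int × Int) : Option Nat :=
  PySem.Dict.get? pvKeywords (PySem.Str.slice name (some p.1) (some (p.1 + p.2)))

-- get? on a literal dict with distinct keys is association-list membership
lemma pv_assoc_get?_iff {v : Type} [DecidableEq v] (l : List (String × v))
    (hnd : (l.map Prod.fst).Nodup) (t : String) (g : v) :
    (PySem.Dict.mk l).get? t = some g ↔ (t, g) ∈ l := by
  induction l with
  | nil => simp [PySem.Dict.get?]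
  | cons a l ih =>
    obtain ⟨k, w⟩ := a
    simp only [List.map_cons, List.nodup_cons] at hnd
    rw [PySem.Dict.get?_mk_cons]
    by_cases hk : k = t
    · subst hk
      rw [if_pos (by simp)]
      constructor
      · rintro h; cases h; exact List.mem_cons_self
      · rintro h
        rcases List.mem_cons.mp h with he | hm
        · cases he; rfl
        · exact absurd (List.mem_map_of_mem (f := Prod.fst) hm) (by simpa using hnd.1)
    · rw [if_neg (by simpa using hk)]
      rw [ih hnd.2]
      simp [List.mem_cons, Prod.ext_iff, Ne.symm hk]

-- dict lookup on the literal dict is association-list membership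
lemma pv_get?_iff (t : String) (g : Nat) :
    PySem.Dict.get? pvKeywords t = some g ↔ (t, g) ∈ pvKWL := by
  have hmk : pvKeywords = PySem.Dict.mk pvKWL := by decide
  rw [hmk]
  exact pv_assoc_get?_iff pvKWL (by decide) t g

-- generic spec of the min-scan fold
lemma pv_scan_spec {α : Type} (v : α → Option Nat) (L : List α) (b : Nat) :
    (L.foldl (fun b x => match v x with | some g => if g < b then g else b | none => b) b) ≤ b ∧
    (∀ x ∈ L, ∀ g, v x = some g →
      (L.foldl (fun b x => match v x with | some g => if g < b then g else b | none => b) b) ≤ g) ∧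
    ((L.foldl (fun b x => match v x with | some g => if g < b then g else b | none => b) b) = b ∨
      ∃ x ∈ L, v x = some (L.foldl (fun b x => match v x with | some g => if g < b then g else b | none => b) b)) := by
  induction L generalizing b with
  | nil => simp
  | cons a L ih =>
    simp only [List.foldl_cons]
    rcases hv : v a with _ | g <;> simp only [hv]
    · obtain ⟨h1, h2, h3⟩ := ih b
      refine ⟨h1, ?_, ?_⟩
      · intro x hx g hg
        rcases List.mem_cons.mp hx with rfl | hx'
        · rw [hv] at hg; cases hg
        · exact h2 x hx' g hg
      · rcases h3 with h | ⟨x, hx, hxe⟩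
        · exact Or.inl h
        · exact Or.inr ⟨x, List.mem_cons_of_mem _ hx, hxe⟩
    · by_cases hlt : g < b
      · simp only [if_pos hlt]
        obtain ⟨h1, h2, h3⟩ := ih g
        refine ⟨h1.trans hlt.le, ?_, ?_⟩
        · intro x hx g' hg'
          rcases List.mem_cons.mp hx with rfl | hx'
          · rw [hv] at hg'; cases hg'; exact h1
          · exact h2 x hx' g' hg'
        · rcases h3 with h | ⟨x, hx, hxe⟩
          · exact Or.inr ⟨a, List.mem_cons_self, by rw [hv, h]⟩
          · exact Or.inr ⟨x, List.mem_cons_of_mem _ hx, hxe⟩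
      · simp only [if_neg hlt]
        obtain ⟨h1, h2, h3⟩ := ih b
        refine ⟨h1, ?_, ?_⟩
        · intro x hx g' hg'
          rcases List.mem_cons.mp hx with rfl | hx'
          · rw [hv] at hg'; cases hg'; omega
          · exact h2 x hx' g' hg'
        · rcases h3 with h | ⟨x, hx, hxe⟩
          · exact Or.inl h
          · exact Or.inr ⟨x, List.mem_cons_of_mem _ hx, hxe⟩

-- a hit in the scan ↔ some keyword of group g occurs in the scanned string
lemma pv_hit_iff (name : String) (g : Nat) :
    (∃ p ∈ pvPairs name, pvV name p = some g) ↔ pvOcc name.toList g := by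
  constructor
  · rintro ⟨p, hp, hv⟩
    simp only [pvPairs, List.mem_flatMap, List.mem_map] at hp
    obtain ⟨i, hi', l, hl', rfl⟩ := hp
    rw [PySem.List.mem_pyRange_one] at hi'
    have hl2 : (2 : Int) ≤ l := by
      have : ∀ x ∈ pvLengths, (2 : Int) ≤ x := by decide
      exact this l hl'
    rw [pvV, pv_get?_iff] at hv
    refine ⟨_, hv, ?_⟩
    rw [PySem.Str.toList_slice, PySem.Chars.slice_eq_listSlice, PySem.List.slice_toNat]
    · exact List.infix_iff_prefix_suffix.mpr
        ⟨name.toList.drop i.toNat, List.take_prefix _ _, List.drop_suffix _ _⟩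
    · exact hi'.1
    · change 0 ≤ i + l
      omega
  · rintro ⟨k, hk, hinf⟩
    obtain ⟨t, hpre, hsuf⟩ := List.infix_iff_prefix_suffix.mp hinf
    obtain ⟨j, hj⟩ : ∃ j, t = name.toList.drop j :=
      ⟨name.toList.length - t.length, by
        have := List.suffix_iff_eq_drop.mp hsuf; exact this⟩
    subst hj
    have hk2 : 2 ≤ k.toList.length := by
      have : ∀ q ∈ pvKWL, 2 ≤ q.1.toList.length := by decide
      exact this (k, g) hk
    have hkle : k.toList.length ≤ name.toList.length - j := by
      have := hpre.length_le
      simpa using this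
    have hjlt : j < name.toList.length := by omega
    have htake : (name.toList.drop j).take k.toList.length = k.toList :=
      (List.prefix_iff_eq_take.mp hpre).symm
    have hlmem : (k.toList.length : Int) ∈ pvLengths := by
      have : ∀ q ∈ pvKWL, ((q.1.toList.length : Nat) : Int) ∈ pvLengths := by decide
      exact this (k, g) hk
    refine ⟨((j : Int), (k.toList.length : Int)), ?_, ?_⟩
    · simp only [pvPairs, List.mem_flatMap, List.mem_map]
      exact ⟨(j : Int), by
        rw [PySem.List.mem_pyRange_one]
        constructor
        · omega
        · simp only [PySem.Str.len_eq]; exact_mod_cast hjlt,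
        (k.toList.length : Int), hlmem, rfl⟩
    · rw [pvV, pv_get?_iff]
      have hslice : PySem.Str.slice name (some (j : Int))
          (some ((j : Int) + (k.toList.length : Int))) = k := by
        apply String.toList_inj.mp
        rw [PySem.Str.toList_slice, PySem.Chars.slice_eq_listSlice, PySem.List.slice_toNat]
        case ha => omega
        case hb => omega
        have h1 : ((j : Int)).toNat = j := by omega
        have h2 : (((j : Int) + (k.toList.length : Int))).toNat = j + k.toList.length := by omega
        rw [h1, h2]
        simpa [Nat.add_sub_cancel_left] using htake
      rw [hslice]; exact hk

-- any-over-keyword-list ↔ an infix exists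
lemma pv_any_iff (name : String) (kws : List String) :
    (kws.any (fun x => PySem.Str.isIn x name) = true) ↔ ∃ k ∈ kws, k.toList <:+: name.toList := by
  simp [List.any_eq_true, PySem.Chars.isIn_iff_infix]

-- ===== VERDICT (by name: the statement is the Claim_ definition above) =====
theorem infer_group_py_spec : Claim_equal_infer_group_py := by
  intro s h _
  unfold Spec_infer_group_py infer_group_py infer_group_py_alt
  simp only []
  set name := PySem.Str.lower s with hname
  -- rewrite B's double fold as a fold over the pair list
  have hfold :
      (PySem.List.pyRange 0 (PySem.Str.len name) 1).foldl
        (fun best i =>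
          pvLengths.foldl
            (fun best l =>
              match PySem.Dict.get? pvKeywords (PySem.Str.slice name (some i) (some (i + l))) with
              | some g => if g < best then g else best
              | none => best)
            best)
        6 =
      (pvPairs name).foldl
        (fun b x => match pvV name x with | some g => if g < b then g else b | none => b) 6 := by
    rw [pvPairs, List.foldl_flatMap]
    simp only [List.foldl_map]
    rfl
  obtain ⟨hb6, hble, hbmem⟩ := pv_scan_spec (pvV name) (pvPairs name) 6
  set best := (pvPairs name).foldl
      (fun b x => match pvV name x with | some g => if g < b then g else b | none => b) 6 with hbest
  rw [hfold]
  -- occurrence facts per group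
  have hup : ∀ g : Nat, (∃ p ∈ pvPairs name, pvV name p = some g) ↔ pvOcc name.toList g :=
    fun g => pv_hit_iff name g
  have hlow : ∀ g : Nat, pvOcc name.toList g → best ≤ g := by
    intro g hg
    obtain ⟨p, hp, hv⟩ := (hup g).mpr hg
    exact hble p hp g hv
  have hval : best = 6 ∨ pvOcc name.toList best := by
    rcases hbmem with h | ⟨p, hp, hv⟩
    · exact Or.inl h
    · exact Or.inr ((hup best).mp ⟨p, hp, hv⟩)
  -- the six conditions
  have e0 : (["prod", "production"].any (fun x => PySem.Str.isIn x name) = true) ↔ pvOcc name.toList 0 := by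
    rw [pv_any_iff]; simp [pvOcc, pvKWL]
  have e1 : (["dev", "development"].any (fun x => PySem.Str.isIn x name) = true) ↔ pvOcc name.toList 1 := by
    rw [pv_any_iff]; simp [pvOcc, pvKWL]
  have e2 : (["staging", "stage", "test"].any (fun x => PySem.Str.isIn x name) = true) ↔ pvOcc name.toList 2 := by
    rw [pv_any_iff]; simp [pvOcc, pvKWL]
  have e3 : (["db", "database", "mysql", "postgres"].any (fun x => PySem.Str.isIn x name) = true) ↔ pvOcc name.toList 3 := by
    rw [pv_any_iff]; simp [pvOcc, pvKWL]
  have e4 : (["web", "http", "nginx", "apache"].any (fun x => PySem.Str.isIn x name) = true) ↔ pvOcc name.toList 4 := by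
    rw [pv_any_iff]; simp [pvOcc, pvKWL]
  have e5 : (["vpn", "gateway", "router"].any (fun x => PySem.Str.isIn x name) = true) ↔ pvOcc name.toList 5 := by
    rw [pv_any_iff]; simp [pvOcc, pvKWL]
  by_cases h0 : pvOcc name.toList 0
  · rw [if_pos (e0.mpr h0)]
    have : best = 0 := Nat.le_zero.mp (hlow 0 h0)
    rw [this]; rfl
  rw [if_neg (fun hc => h0 (e0.mp hc))]
  by_cases h1 : pvOcc name.toList 1
  · rw [if_pos (e1.mpr h1)]
    have hb1 : best ≤ 1 := hlow 1 h1
    have : best = 1 := by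
      rcases hval with h | h
      · omega
      · interval_cases best
        · exact absurd h h0
        · rfl
    rw [this]; rfl
  rw [if_neg (fun hc => h1 (e1.mp hc))]
  by_cases h2 : pvOcc name.toList 2
  · rw [if_pos (e2.mpr h2)]
    have hb2 : best ≤ 2 := hlow 2 h2
    have : best = 2 := by
      rcases hval with h | h
      · omega
      · interval_cases best
        · exact absurd h h0
        · exact absurd h h1
        · rfl
    rw [this]; rfl
  rw [if_neg (fun hc => h2 (e2.mp hc))]
  by_cases h3 : pvOcc name.toList 3
  · rw [if_pos (e3.mpr h3)]
    have hb3 : best ≤ 3 := hlow 3 h3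
    have : best = 3 := by
      rcases hval with h | h
      · omega
      · interval_cases best
        · exact absurd h h0
        · exact absurd h h1
        · exact absurd h h2
        · rfl
    rw [this]; rfl
  rw [if_neg (fun hc => h3 (e3.mp hc))]
  by_cases h4 : pvOcc name.toList 4
  · rw [if_pos (e4.mpr h4)]
    have hb4 : best ≤ 4 := hlow 4 h4
    have : best = 4 := by
      rcases hval with h | h
      · omega
      · interval_cases best
        · exact absurd h h0
        · exact absurd h h1
        · exact absurd h h2
        · exact absurd h h3
        · rfl
    rw [this]; rfl
  rw [if_neg (fun hc => h4 (e4.mp hc))]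
  by_cases h5 : pvOcc name.toList 5
  · rw [if_pos (e5.mpr h5)]
    have hb5 : best ≤ 5 := hlow 5 h5
    have : best = 5 := by
      rcases hval with h | h
      · omega
      · interval_cases best
        · exact absurd h h0
        · exact absurd h h1
        · exact absurd h h2
        · exact absurd h h3
        · exact absurd h h4
        · rfl
    rw [this]; rfl
  rw [if_neg (fun hc => h5 (e5.mp hc))]
  have : best = 6 := by
    rcases hval with h | h
    · exact h
    · interval_cases best
      · exact absurd h h0
      · exact absurd h h1
      · exact absurd h h2
      · exact absurd h h3
      · exact absurd h h4
      · exact absurd h h5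
      · rfl
  rw [this]; rfl
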